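-- pv_equiv track=rewrite | github.com/pronea-hackathon-2026/hackathon | backend/services/scoring.py | calculate_attention_score
-- ===== SOURCE A (Python) =====
-- def calculate_attention_score(attention_events: list[dict]) -> int:
--     """Calculate attention score from attention event array."""
--     score = 100
--     for event in attention_events:
--         etype = event.get("type", "")
--         if etype == "phone_detected":
--             score -= 20
--         elif etype in ("tab_switch", "window_blur"):
--             score -= 10
--         elif etype == "gaze_away":
--             score -= 5
--     return max(0, score)
-- ===== SOURCE B (Python) =====
-- def calculate_attention_score(attention_events: list[dict]) -> int:
--     """Calculate attention score from attention event array."""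
--     counts = {}
--     for event in attention_events:
--         t = event.get("type", "")
--         counts[t] = counts.get(t, 0) + 1
--     score = (100
--              - 20 * counts.get("phone_detected", 0)
--              - 10 * (counts.get("tab_switch", 0) + counts.get("window_blur", 0))
--              - 5 * counts.get("gaze_away", 0))
--     return max(0, score)
-- ===== Notes on version B (the rewrite author's own statement) =====
-- stated objective: alternative
-- what changed: B first builds a frequency table of event types in one pass, then computes the score as a fixed weighted combination of four counts, instead of A's running-score accumulation with per-event branching.
import Mathlib
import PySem

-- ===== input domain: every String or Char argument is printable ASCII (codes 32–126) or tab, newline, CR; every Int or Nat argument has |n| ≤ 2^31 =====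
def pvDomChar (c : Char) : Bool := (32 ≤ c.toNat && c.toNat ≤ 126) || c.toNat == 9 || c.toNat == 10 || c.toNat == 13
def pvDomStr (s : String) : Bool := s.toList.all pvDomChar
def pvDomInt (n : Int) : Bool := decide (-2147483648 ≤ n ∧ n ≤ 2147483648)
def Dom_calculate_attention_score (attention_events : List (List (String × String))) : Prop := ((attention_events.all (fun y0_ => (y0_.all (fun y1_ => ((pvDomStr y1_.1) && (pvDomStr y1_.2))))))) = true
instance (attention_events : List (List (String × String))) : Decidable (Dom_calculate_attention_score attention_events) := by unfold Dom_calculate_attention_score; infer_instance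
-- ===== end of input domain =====

-- B builds a frequency table of event types once, then combines four counts with fixed
-- weights, instead of A's running-score loop; objective: alternative decomposition.

-- ===== PORT A =====
-- event.get("type", "") : first-match lookup in the event dict
def pvEType (event : List (String × String)) : String :=
  (PySem.Dict.mk event).getD "type" ""

def calculate_attention_score (attention_events : List (List (String × String))) : Int :=
  let score : Int :=
    attention_events.foldl (fun score event =>
      let etype := pvEType event
      if etype == "phone_detected" then score - 20
      else if etype == "tab_switch" || etype == "window_blur" then score - 10
      else if etype == "gaze_away" then score - 5
      else score) 100
  max 0 score

-- ===== PORT B =====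
def calculate_attention_score_alt (attention_events : List (List (String × String))) : Int :=
  let counts : PySem.Dict String Int :=
    attention_events.foldl (fun d event =>
      let t := pvEType event
      d.insert t (d.getD t 0 + 1)) PySem.Dict.empty
  let score : Int :=
    100 - 20 * counts.getD "phone_detected" 0
        - 10 * (counts.getD "tab_switch" 0 + counts.getD "window_blur" 0)
        - 5 * counts.getD "gaze_away" 0
  max 0 score

-- ===== PRECONDITION & SPEC =====
def Spec_calculate_attention_score (attention_events : List (List (String × String))) (out : Int) : Prop := out = calculate_attention_score_alt attention_events
instance (attention_events : List (List (String × String))) (out : Int) : Decidable (Spec_calculate_attention_score attention_events out) := by unfold Spec_calculate_attention_score; infer_instance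

-- ===== CLAIM (what is proved, stated in full; the proofs are below) =====
def Claim_equal_calculate_attention_score : Prop := ∀ (attention_events : List (List (String × String))), Dom_calculate_attention_score attention_events → Spec_calculate_attention_score attention_events (calculate_attention_score attention_events)

-- ===== LEMMAS AND PROOFS =====

-- A's loop body as a function of the event type only
def pvStep (s : Int) (t : String) : Int :=
  if t == "phone_detected" then s - 20
  else if t == "tab_switch" || t == "window_blur" then s - 10
  else if t == "gaze_away" then s - 5
  else s

theorem pvA_loop (ts : List String) : ∀ s : Int,
    ts.foldl pvStep s
      = s - 20 * (ts.count "phone_detected" : Int)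
          - 10 * ((ts.count "tab_switch" : Int) + (ts.count "window_blur" : Int))
          - 5 * (ts.count "gaze_away" : Int) := by
  induction ts with
  | nil => intro s; simp
  | cons t rest ih =>
    intro s
    simp only [List.foldl_cons, ih, List.count_cons]
    by_cases h1 : t = "phone_detected" <;>
      by_cases h2 : t = "tab_switch" <;>
      by_cases h3 : t = "window_blur" <;>
      by_cases h4 : t = "gaze_away" <;>
      simp [pvStep, h1, h2, h3, h4] <;> ring

theorem calc_spec (attention_events : List (List (String × String))) :
    calculate_attention_score attention_events = calculate_attention_score_alt attention_events := by
  unfold calculate_attention_score calculate_attention_score_alt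
  have hA : attention_events.foldl (fun score event =>
      let etype := pvEType event
      if etype == "phone_detected" then score - 20
      else if etype == "tab_switch" || etype == "window_blur" then score - 10
      else if etype == "gaze_away" then score - 5
      else score) 100
      = (attention_events.map pvEType).foldl pvStep 100 := by
    rw [List.foldl_map]; rfl
  have hB : attention_events.foldl (fun d event =>
      let t := pvEType event
      d.insert t (d.getD t 0 + 1)) (PySem.Dict.empty : PySem.Dict String Int)
      = (attention_events.map pvEType).foldl
          (fun d t => d.insert t (d.getD t 0 + 1)) PySem.Dict.empty := by
    rw [List.foldl_map]
  simp only [hA, hB, pvA_loop, PySem.Dict.getD_foldl_insert_add_one]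
  simp [PySem.Dict.empty, PySem.Dict.getD, PySem.Dict.get?]

-- ===== VERDICT (by name: the statement is the Claim_ definition above) =====
theorem calculate_attention_score_spec : Claim_equal_calculate_attention_score := by
  intro evs _
  unfold Spec_calculate_attention_score
  exact calc_spec evs
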